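-- pv_equiv track=rewrite | github.com/Apreche/advent-of-code | 2021/15/chiton-2.py | multiply_grid
-- ===== SOURCE A (Python) =====
-- def wrap_nine(num):
--     while num > 9:
--         num = num - 9
--     return num
--
-- def multiply_grid(grid, factor=5):
--     new_grid = []
--     for fy in range(factor):
--         for row in grid:
--             new_row = []
--             for fx in range(factor):
--                 for column in row:
--                     new_row.append(
--                         wrap_nine(column + fx + fy)
--                     )
--             new_grid.append(new_row)
--     return new_grid
-- ===== SOURCE B (Python) =====
-- def multiply_grid(grid, factor=5):
--     # Precompute, once per original row, all 2*factor-1 shifted-and-wrapped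
--     # variants (wrap in closed form), then assemble the output purely by
--     # table lookups vrow[fy+fx].
--     variants = [
--         [[(c + s - 1) % 9 + 1 if c + s > 9 else c + s for c in row]
--          for s in range(2 * factor - 1)]
--         for row in grid
--     ]
--     out = []
--     for fy in range(factor):
--         for vrow in variants:
--             new_row = []
--             for fx in range(factor):
--                 new_row += vrow[fy + fx]
--             out.append(new_row)
--     return out
-- ===== Notes on version B (the rewrite author's own statement) =====
-- stated objective: alternative
-- what changed: Replaces A's fused 4-level loop that re-wraps every cell factor^2 times via a subtraction loop with a memoization table: each row's 2*factor-1 shifted-and-wrapped variants are computed once (wrap in closed form via %) and the output is assembled by table lookups vrow[fy+fx].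
import Mathlib
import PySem

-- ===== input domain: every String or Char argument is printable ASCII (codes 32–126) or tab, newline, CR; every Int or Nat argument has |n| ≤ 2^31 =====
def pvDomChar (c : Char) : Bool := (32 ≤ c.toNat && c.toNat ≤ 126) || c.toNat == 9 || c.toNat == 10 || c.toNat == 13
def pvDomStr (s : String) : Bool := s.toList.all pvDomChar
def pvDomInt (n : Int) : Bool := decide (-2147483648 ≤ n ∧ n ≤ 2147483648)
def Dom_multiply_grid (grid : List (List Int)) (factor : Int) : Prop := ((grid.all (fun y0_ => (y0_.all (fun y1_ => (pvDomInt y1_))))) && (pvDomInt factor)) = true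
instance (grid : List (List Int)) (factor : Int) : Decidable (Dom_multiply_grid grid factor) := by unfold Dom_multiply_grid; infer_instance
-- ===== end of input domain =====

-- B replaces A's fused 4-level loop (which re-wraps every cell factor^2 times via a
-- subtraction loop) with a per-row memoization table of the 2*factor-1 shifted wrapped
-- variants (wrap in closed form) assembled by index lookups; same output, different structure.

-- ===== PORT A =====
def wrap_nine (num : Int) : Int :=
  if num > 9 then wrap_nine (num - 9) else num
termination_by num.toNat
decreasing_by simp_wf; omega

def multiply_grid (grid : List (List Int)) (factor : Int) : List (List Int) :=
  (PySem.List.pyRange 0 factor 1).foldl (fun new_grid fy =>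
    grid.foldl (fun new_grid row =>
      new_grid ++ [(PySem.List.pyRange 0 factor 1).foldl (fun new_row fx =>
        row.foldl (fun new_row column =>
          new_row ++ [wrap_nine (column + fx + fy)]) new_row) []]) new_grid) []

-- ===== PORT B =====
def multiply_grid_alt (grid : List (List Int)) (factor : Int) : List (List Int) :=
  let variants := grid.map (fun row =>
    (PySem.List.pyRange 0 (2 * factor - 1) 1).map (fun s =>
      row.map (fun c =>
        if c + s > 9 then PySem.Int.mod (c + s - 1) 9 + 1 else c + s)))
  (PySem.List.pyRange 0 factor 1).foldl (fun out fy =>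
    variants.foldl (fun out vrow =>
      out ++ [(PySem.List.pyRange 0 factor 1).foldl (fun new_row fx =>
        new_row ++ PySem.List.pyGetD vrow (fy + fx) []) []]) out) []

-- ===== PRECONDITION & SPEC =====
def Spec_multiply_grid (grid : List (List Int)) (factor : Int) (out : List (List Int)) : Prop := out = multiply_grid_alt grid factor
instance (grid : List (List Int)) (factor : Int) (out : List (List Int)) : Decidable (Spec_multiply_grid grid factor out) := by unfold Spec_multiply_grid; infer_instance

-- ===== CLAIM (what is proved, stated in full; the proofs are below) =====
def Claim_equal_multiply_grid : Prop := ∀ (grid : List (List Int)) (factor : Int), Dom_multiply_grid grid factor → Spec_multiply_grid grid factor (multiply_grid grid factor)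

-- ===== LEMMAS AND PROOFS =====

-- A's subtraction loop equals B's closed-form wrap
lemma wrap_closed (n : Int) :
    wrap_nine n = if n > 9 then PySem.Int.mod (n - 1) 9 + 1 else n := by
  rw [wrap_nine]
  split_ifs with h
  · rw [wrap_closed (n - 9)]
    rw [PySem.Int.mod_eq_emod_of_pos (by norm_num), PySem.Int.mod_eq_emod_of_pos (by norm_num)]
    split_ifs with h2 <;> omega
  · rfl
termination_by n.toNat
decreasing_by simp_wf; omega

-- the (fy,row) output row of A equals B's lookup-assembled row
lemma row_eq (row : List Int) (factor fy : Int) (hfy0 : 0 ≤ fy) (hfy : fy < factor) :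
    (PySem.List.pyRange 0 factor 1).foldl (fun new_row fx =>
        new_row ++ row.map (fun column => wrap_nine (column + fx + fy))) []
      = (PySem.List.pyRange 0 factor 1).foldl (fun new_row fx =>
          new_row ++ PySem.List.pyGetD
            ((PySem.List.pyRange 0 (2 * factor - 1) 1).map (fun s =>
              row.map (fun c =>
                if c + s > 9 then PySem.Int.mod (c + s - 1) 9 + 1 else c + s)))
            (fy + fx) []) [] := by
  rw [PySem.List.foldl_append_eq_flatMap, PySem.List.foldl_append_eq_flatMap]
  apply List.flatMap_congr
  intro fx hfx
  rw [PySem.List.mem_pyRange_one] at hfx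
  rw [PySem.List.pyGetD_map_pyRange_of_nonneg _ _ _ _ (by omega) (by omega)]
  apply List.map_congr_left
  intro c _
  rw [wrap_closed]
  have : c + fx + fy = c + (fy + fx) := by ring
  rw [this]

-- ===== VERDICT (by name: the statement is the Claim_ definition above) =====
theorem multiply_grid_spec : Claim_equal_multiply_grid := by
  intro grid factor _
  unfold Spec_multiply_grid multiply_grid multiply_grid_alt
  apply PySem.List.foldl_congr_mem
  intro acc fy hfy
  rw [PySem.List.mem_pyRange_one] at hfy
  simp only [PySem.List.foldl_append_singleton_eq_map, List.map_map, Function.comp_def]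
  congr 1
  apply List.map_congr_left
  intro row _
  exact row_eq row factor fy hfy.1 hfy.2
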